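-- pv_equiv track=rewrite | github.com/Louis-Gabriel-TM/computer_science | 4_classic_puzzles/4_1_with_arrays/same_frequencies.py | refactored_same
-- ===== SOURCE A (Python) =====
-- def refactored_same(array_1, array_2):
--     # Time complexity: O(n)
--     if len(array_1) != len(array_2):
--         return False
--
--     counter_1 = dict()
--     counter_2 = dict()
--     for elt in array_1:
--         counter_1.setdefault(elt, 0)
--         counter_1[elt] += 1
--     for elt in array_2:
--         counter_2.setdefault(elt, 0)
--         counter_2[elt] += 1
--
--     for key in counter_1:
--         if key**2 not in counter_2:
--             return False
--         if counter_2[key**2] != counter_1[key]: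
--             return False
--     # Successive loops are often better than a nested loop
--
--     return True
-- ===== SOURCE B (Python) =====
-- def _bisect_left(s, x):
--     lo, hi = 0, len(s)
--     while lo < hi:
--         mid = (lo + hi) // 2
--         if s[mid] < x:
--             lo = mid + 1
--         else:
--             hi = mid
--     return lo
--
--
-- def _bisect_right(s, x):
--     lo, hi = 0, len(s)
--     while lo < hi:
--         mid = (lo + hi) // 2
--         if x < s[mid]:
--             hi = mid
--         else:
--             lo = mid + 1
--     return lo
--
--
-- def refactored_same(array_1, array_2):
--     # Sort-and-binary-search version: no frequency tables.
--     # Walk each run of equal values e in sorted array_1; its run length is the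
--     # multiplicity of e in array_1, and the count of e*e in sorted array_2 is
--     # found by two binary searches.
--     if len(array_1) != len(array_2):
--         return False
--     s1 = sorted(array_1)
--     s2 = sorted(array_2)
--     i, n = 0, len(s1)
--     while i < n:
--         e = s1[i]
--         j = i + 1
--         while j < n and s1[j] == e:
--             j += 1
--         if _bisect_right(s2, e * e) - _bisect_left(s2, e * e) != j - i:
--             return False
--         i = j
--     return True
-- ===== Notes on version B (the rewrite author's own statement) =====
-- stated objective: alternative
-- what changed: Replaces A's two hash frequency tables with sorting both arrays, walking runs of equal values in sorted array_1, and counting e*e in sorted array_2 via two binary searches.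
import Mathlib
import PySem

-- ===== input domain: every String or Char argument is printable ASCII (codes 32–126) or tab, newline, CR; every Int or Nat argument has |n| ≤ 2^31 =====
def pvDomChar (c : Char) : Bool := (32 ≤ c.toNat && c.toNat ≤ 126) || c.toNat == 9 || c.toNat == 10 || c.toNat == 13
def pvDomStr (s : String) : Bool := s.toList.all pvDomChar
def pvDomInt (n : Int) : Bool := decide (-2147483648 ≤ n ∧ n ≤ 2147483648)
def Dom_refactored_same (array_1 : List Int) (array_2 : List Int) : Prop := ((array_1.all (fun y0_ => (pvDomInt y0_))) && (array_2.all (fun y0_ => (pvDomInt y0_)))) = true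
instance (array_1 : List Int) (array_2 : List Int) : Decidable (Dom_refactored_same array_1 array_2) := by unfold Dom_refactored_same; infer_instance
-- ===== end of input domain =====

-- B replaces A's two hash frequency tables by sorting both arrays, walking runs of equal
-- values in sorted array_1 and binary-searching the count of e*e in sorted array_2.


-- ===== PORT A =====
def refactored_same (array_1 : List Int) (array_2 : List Int) : Bool :=
  if array_1.length ≠ array_2.length then false
  else
    -- counter_1/counter_2: setdefault-to-0 then += 1 is PySem.Dict.modify _ 0 (· + 1)
    let counter_1 := array_1.foldl (fun d elt => d.modify elt (0 : Int) (· + 1)) PySem.Dict.empty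
    let counter_2 := array_2.foldl (fun d elt => d.modify elt (0 : Int) (· + 1)) PySem.Dict.empty
    -- for key in counter_1: early returns become short-circuit all
    counter_1.keys.all (fun key =>
      counter_2.contains (key ^ 2) && (counter_2.getD (key ^ 2) 0 == counter_1.getD key 0))

-- ===== PORT B =====
-- inner while 'j = i+1; while j < n and s1[j] == e: j += 1': length of the run of e
-- continuing after the current element
def runLen (e : Int) : List Int → Nat
  | [] => 0
  | a :: t => if a = e then runLen e t + 1 else 0

theorem runLen_le (e : Int) (t : List Int) : runLen e t ≤ t.length := by
  induction t with
  | nil => simp [runLen]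
  | cons a t ih => simp only [runLen]; split <;> simp <;> omega

-- outer while over sorted array_1, as recursion on the suffix starting at i;
-- _bisect_left/_bisect_right in Source B are the standard bisect routines,
-- ported as PySem.List.bisectLeft / bisectRight (the same lo/hi halving loop)
def checkRuns (s2 : List Int) : List Int → Bool
  | [] => true
  | e :: t =>
    let r := runLen e t
    if ((PySem.List.bisectRight s2 (e * e) : Int) - (PySem.List.bisectLeft s2 (e * e) : Int))
        ≠ ((r + 1 : Nat) : Int) then false
    else checkRuns s2 (t.drop r)
termination_by l => l.length
decreasing_by
  have := runLen_le e t
  simp only [List.length_drop, List.length_cons]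
  omega

def refactored_same_alt (array_1 : List Int) (array_2 : List Int) : Bool :=
  if array_1.length ≠ array_2.length then false
  else
    let s1 := PySem.List.sorted array_1 (fun x => x) false
    let s2 := PySem.List.sorted array_2 (fun x => x) false
    checkRuns s2 s1

-- ===== PRECONDITION & SPEC =====
def Spec_refactored_same (array_1 : List Int) (array_2 : List Int) (out : Bool) : Prop := out = refactored_same_alt array_1 array_2
instance (array_1 : List Int) (array_2 : List Int) (out : Bool) : Decidable (Spec_refactored_same array_1 array_2 out) := by unfold Spec_refactored_same; infer_instance

-- ===== CLAIM =====
def Claim_equal_refactored_same : Prop := ∀ (array_1 : List Int) (array_2 : List Int), Dom_refactored_same array_1 array_2 → Spec_refactored_same array_1 array_2 (refactored_same array_1 array_2)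

-- ===== LEMMAS AND PROOFS =====

-- counting by an index window: if s[j] = x exactly for a ≤ j < b, then count x s = b - a
theorem count_eq_of_index_window (x : Int) (s : List Int) : ∀ (a b : Nat), a ≤ b → b ≤ s.length →
    (∀ (j : Nat) (hj : j < s.length), s[j] = x ↔ (a ≤ j ∧ j < b)) → s.count x = b - a := by
  induction s with
  | nil =>
    intro a b hab hb _
    simp only [List.length_nil, Nat.le_zero] at hb
    subst hb
    simp only [Nat.le_zero] at hab
    subst hab
    simp
  | cons y t ih =>
    intro a b hab hb h
    match a, b with
    | 0, 0 =>
      have hy : y ≠ x := by have := (h 0 (by simp)).mp; simp at this; intro hyx; exact absurd (this hyx) (by omega)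
      have ht : t.count x = 0 := by
        refine ih 0 0 le_rfl (by omega) ?_
        intro j hj
        have := h (j + 1) (by simp; omega)
        simpa using this
      simp [List.count_cons, ht, hy]
    | 0, b' + 1 =>
      have hy : y = x := (h 0 (by simp)).mpr (by omega)
      have ht : t.count x = b' - 0 := by
        refine ih 0 b' (by omega) (by simp at hb; omega) ?_
        intro j hj
        have := h (j + 1) (by simp; omega)
        simp at this ⊢
        omega
      simp [hy, ht]
    | a' + 1, b =>
      have hy : y ≠ x := by
        intro hyx
        have := (h 0 (by simp)).mp hyx
        omega
      obtain ⟨b', rfl⟩ : ∃ b', b = b' + 1 := ⟨b - 1, by omega⟩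
      have ht : t.count x = b' - a' := by
        refine ih a' b' (by omega) (by simp at hb; omega) ?_
        intro j hj
        have := h (j + 1) (by simp; omega)
        simp at this ⊢
        omega
      simp [hy, ht]

theorem bisect_le (s : List Int) (x : Int) (hs : List.Pairwise (· ≤ ·) s) :
    PySem.List.bisectLeft s x ≤ PySem.List.bisectRight s x := by
  obtain ⟨hl1, hl2, hl3⟩ := PySem.List.bisectLeft_spec s x hs
  obtain ⟨hr1, hr2, hr3⟩ := PySem.List.bisectRight_spec s x hs
  by_contra hc
  push_neg at hc
  have hj : PySem.List.bisectRight s x < s.length := by omega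
  have h1 := hl2 _ hj hc
  have h2 := hr3 _ hj le_rfl
  omega

theorem bisect_count (s : List Int) (x : Int) (hs : List.Pairwise (· ≤ ·) s) :
    PySem.List.bisectRight s x - PySem.List.bisectLeft s x = s.count x := by
  obtain ⟨hl1, hl2, hl3⟩ := PySem.List.bisectLeft_spec s x hs
  obtain ⟨hr1, hr2, hr3⟩ := PySem.List.bisectRight_spec s x hs
  have hle := bisect_le s x hs
  have := count_eq_of_index_window x s (PySem.List.bisectLeft s x) (PySem.List.bisectRight s x)
    hle hr1 ?_
  · omega
  · intro j hj
    constructor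
    · intro hjx
      constructor
      · by_contra hc; push_neg at hc; have := hl2 j hj hc; omega
      · by_contra hc; push_neg at hc; have := hr3 j hj hc; omega
    · rintro ⟨h1, h2⟩
      have := hl3 j hj h1
      have := hr2 j hj h2
      omega

theorem bisect_count_int (s : List Int) (x : Int) (hs : List.Pairwise (· ≤ ·) s) :
    ((PySem.List.bisectRight s x : Nat) : Int) - ((PySem.List.bisectLeft s x : Nat) : Int) = ((s.count x : Nat) : Int) := by
  have h1 := bisect_count s x hs
  have h2 := bisect_le s x hs
  omega

-- sorted head-run decomposition: in a sorted e :: t, the first runLen e t elements of t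
-- equal e and the rest contains no e
theorem runLen_take (e : Int) (t : List Int) : ∀ y ∈ t.take (runLen e t), y = e := by
  induction t with
  | nil => simp
  | cons a t ih =>
    simp only [runLen]
    split
    · rename_i ha
      intro y hy
      simp only [List.take_succ_cons, List.mem_cons] at hy
      rcases hy with rfl | hy
      · exact ha
      · exact ih y hy
    · simp

theorem runLen_drop_head (e : Int) (t : List Int) :
    ∀ h : runLen e t < t.length, t[runLen e t] ≠ e := by
  induction t with
  | nil => simp
  | cons a t ih =>
    simp only [runLen]
    split
    · intro h
      simpa using ih (by simpa using h)
    · intro h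
      simpa using ‹¬ a = e›

theorem sorted_count_drop (e : Int) (t : List Int)
    (hs : List.Pairwise (· ≤ ·) (e :: t)) : (t.drop (runLen e t)).count e = 0 := by
  rcases Nat.lt_or_ge (runLen e t) t.length with hlt | hge
  · set r := runLen e t with hr
    have hhead : t[r] ≠ e := runLen_drop_head e t hlt
    have hhead_le : e ≤ t[r] := (List.pairwise_cons.mp hs).1 _ (t.getElem_mem hlt)
    have hlt' : e < t[r] := lt_of_le_of_ne hhead_le (Ne.symm hhead)
    rw [List.count_eq_zero]
    intro hmem
    obtain ⟨k, hk, hke⟩ := List.getElem_of_mem hmem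
    have hsort_t : List.Pairwise (· ≤ ·) t := (List.pairwise_cons.mp hs).2
    have hk' : k < t.length - r := by simpa using hk
    have hklen : r + k < t.length := by omega
    have hke' : t[r + k]'hklen = e := by
      rw [← hke]; simp [List.getElem_drop]
    have hle : t[r]'hlt ≤ t[r + k]'hklen := by
      rcases Nat.eq_zero_or_pos k with rfl | hkpos
      · simp
      · exact List.pairwise_iff_getElem.mp hsort_t r (r + k) hlt hklen (by omega)
    omega
  · rw [List.drop_eq_nil_of_le hge]
    simp

theorem count_cons_run (e : Int) (t : List Int)
    (hs : List.Pairwise (· ≤ ·) (e :: t)) :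
    (e :: t).count e = runLen e t + 1 := by
  set r := runLen e t with hr
  have hsplit : t = t.take r ++ t.drop r := (List.take_append_drop r t).symm
  have htake : (t.take r).count e = r := by
    have hlen : (t.take r).length = r := by
      rw [List.length_take]
      have := runLen_le e t
      omega
    rw [List.count_eq_length.mpr]
    · exact hlen
    · intro y hy
      exact (runLen_take e t y hy) ▸ rfl
  have hdrop := sorted_count_drop e t hs
  rw [List.count_cons_self]
  conv_lhs => rw [hsplit]
  rw [List.count_append, htake, hdrop]

theorem count_mem_drop (e e' : Int) (t : List Int)
    (hs : List.Pairwise (· ≤ ·) (e :: t)) (hmem : e' ∈ t.drop (runLen e t)) :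
    (e :: t).count e' = (t.drop (runLen e t)).count e' := by
  set r := runLen e t with hr
  have hne : e ≠ e' := by
    intro h
    rw [← h] at hmem
    have := sorted_count_drop e t hs
    rw [List.count_eq_zero] at this
    exact this hmem
  have hsplit : t = t.take r ++ t.drop r := (List.take_append_drop r t).symm
  have htake : (t.take r).count e' = 0 := by
    rw [List.count_eq_zero]
    intro hmem'
    exact hne ((runLen_take e t e' hmem') ▸ rfl)
  rw [List.count_cons_of_ne hne]
  conv_lhs => rw [hsplit]
  rw [List.count_append, htake]
  omega

theorem mem_cons_run (e y : Int) (t : List Int) :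
    y ∈ e :: t ↔ y = e ∨ y ∈ t.drop (runLen e t) := by
  constructor
  · intro h
    rcases List.mem_cons.mp h with rfl | ht
    · exact Or.inl rfl
    · conv at ht => rw [← List.take_append_drop (runLen e t) t]
      rcases List.mem_append.mp ht with h1 | h2
      · exact Or.inl (runLen_take e t y h1)
      · exact Or.inr h2
  · rintro (rfl | h)
    · exact List.mem_cons_self
    · exact List.mem_cons_of_mem _ (List.mem_of_mem_drop h)

theorem sorted_drop (e : Int) (t : List Int) (hs : List.Pairwise (· ≤ ·) (e :: t)) :
    List.Pairwise (· ≤ ·) (t.drop (runLen e t)) :=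
  ((List.pairwise_cons.mp hs).2).drop

-- characterisation of B's run walk on sorted lists
theorem checkRuns_iff (s2 : List Int) (hs2 : List.Pairwise (· ≤ ·) s2) :
    ∀ (t : List Int), List.Pairwise (· ≤ ·) t →
    (checkRuns s2 t = true ↔ ∀ e ∈ t, ((s2.count (e * e) : Nat) : Int) = ((t.count e : Nat) : Int)) := by
  intro t
  induction t using checkRuns.induct s2 with
  | case1 => simp [checkRuns]
  | case2 e t r hcond =>
    intro hs
    have hbc := bisect_count_int s2 (e * e) hs2
    have hcc : (e :: t).count e = r + 1 := count_cons_run e t hs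
    rw [checkRuns, if_pos hcond]
    simp only [Bool.false_eq_true, false_iff]
    push_neg
    refine ⟨e, List.mem_cons_self, ?_⟩
    intro hEq
    apply hcond
    rw [hbc, hEq, hcc]
  | case3 e t r hcond ih =>
    intro hs
    have hbc := bisect_count_int s2 (e * e) hs2
    have hcc : (e :: t).count e = r + 1 := count_cons_run e t hs
    rw [checkRuns, if_neg hcond]
    push_neg at hcond
    rw [hbc] at hcond
    have hcnt : s2.count (e * e) = r + 1 := by exact_mod_cast hcond
    have hdropsorted : List.Pairwise (· ≤ ·) (t.drop r) := sorted_drop e t hs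
    rw [ih hdropsorted]
    constructor
    · intro h y hy
      rcases (mem_cons_run e y t).mp hy with rfl | hy'
      · rw [hcnt, hcc]
      · rw [count_mem_drop e y t hs hy']
        exact h y hy'
    · intro h y hy
      have := h y ((mem_cons_run e y t).mpr (Or.inr hy))
      rw [count_mem_drop e y t hs hy] at this
      exact this

-- A-side characterisation (frequency dictionaries)
theorem portA_iff (a1 a2 : List Int) (hl : a1.length = a2.length) :
    (refactored_same a1 a2 = true ↔ ∀ e ∈ a1, a1.count e = a2.count (e * e)) := by
  unfold refactored_same
  simp only [hl, ne_eq, not_true_eq_false, if_false]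
  have hc : ∀ xs : List Int, xs.foldl (fun d elt => d.modify elt (0 : Int) (· + 1)) PySem.Dict.empty = PySem.Dict.counter xs := fun xs => (PySem.Dict.counter_eq_foldl xs).symm
  rw [hc, hc, PySem.Dict.keys_counter]
  rw [List.all_eq_true]
  constructor
  · intro h e he
    have := h e ((PySem.Set.mem_ofList _ _).mpr he)
    simp only [Bool.and_eq_true, beq_iff_eq, PySem.Dict.getD_counter] at this
    have h2 : a2.count (e ^ 2) = a1.count e := by exact_mod_cast this.2
    rw [← h2]
    congr 1
    ring
  · intro h k hk
    have hk' := (PySem.Set.mem_ofList _ _).mp hk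
    have hc2 := h k hk'
    have hpos : 0 < a1.count k := List.count_pos_iff.mpr hk'
    have hmem : k * k ∈ a2 := by
      apply List.count_pos_iff.mp
      omega
    have hksq : k ^ 2 = k * k := by ring
    simp [PySem.Dict.getD_counter, PySem.Dict.contains_counter, hksq, hmem, ← hc2]

-- ===== VERDICT =====
theorem refactored_same_spec : Claim_equal_refactored_same := by
  intro a1 a2 _
  unfold Spec_refactored_same
  by_cases hl : a1.length = a2.length
  · rw [Bool.eq_iff_iff, portA_iff a1 a2 hl]
    unfold refactored_same_alt
    simp only [hl, ne_eq, not_true_eq_false, if_false]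
    set s1 := PySem.List.sorted a1 (fun x => x) false with hs1
    set s2 := PySem.List.sorted a2 (fun x => x) false with hs2
    have hp1 : s1.Perm a1 := PySem.List.sorted_perm a1 _ _
    have hp2 : s2.Perm a2 := PySem.List.sorted_perm a2 _ _
    have hsorted1 : List.Pairwise (· ≤ ·) s1 := PySem.List.sorted_pairwise a1 (fun x => x)
    have hsorted2 : List.Pairwise (· ≤ ·) s2 := PySem.List.sorted_pairwise a2 (fun x => x)
    rw [checkRuns_iff s2 hsorted2 s1 hsorted1]
    constructor
    · intro h e he
      have := h e (hp1.mem_iff.mp he)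
      rw [hp1.count_eq, hp2.count_eq]
      exact_mod_cast this.symm
    · intro h e he
      have := h e (hp1.mem_iff.mpr he)
      rw [hp1.count_eq, hp2.count_eq] at this
      exact_mod_cast this.symm
  · unfold refactored_same refactored_same_alt
    simp [hl]
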